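-- pv_equiv track=rewrite | github.com/stempix/py_urban | homework/module_2/module_2_hard.py | calculate_code
-- ===== SOURCE A (Python) =====
-- def calculate_code(num):# Main calculation func
--     pairs_list = []
--
--     for head_pair_num in range(1, num):
--         tail_pair_num = head_pair_num + 1
--         while tail_pair_num < num:
--             if head_pair_num + tail_pair_num > num:
--                 break
--             if num % (head_pair_num + tail_pair_num) == 0:
--                 pairs_list.extend([head_pair_num, tail_pair_num])
--             tail_pair_num += 1
--     # Convert to string code format
--     return "".join(str(number) for number in pairs_list)
-- ===== SOURCE B (Python) =====
-- def calculate_code(num):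
--     # Precompute the divisors of num once, then emit pairs (h, d-h) per head.
--     divs = [d for d in range(3, num + 1) if num % d == 0]
--     parts = []
--     for h in range(1, (num + 1) // 2):
--         for d in divs:
--             if d > 2 * h:
--                 parts.append(str(h))
--                 parts.append(str(d - h))
--     return "".join(parts)
-- ===== Notes on version B (the rewrite author's own statement) =====
-- stated objective: faster
-- what changed: Instead of scanning all quadratically many (head,tail) pairs and testing each sum, B precomputes the divisors of num once and, per head, emits only the divisors exceeding twice the head, with tail = divisor - head.
import Mathlib
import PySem

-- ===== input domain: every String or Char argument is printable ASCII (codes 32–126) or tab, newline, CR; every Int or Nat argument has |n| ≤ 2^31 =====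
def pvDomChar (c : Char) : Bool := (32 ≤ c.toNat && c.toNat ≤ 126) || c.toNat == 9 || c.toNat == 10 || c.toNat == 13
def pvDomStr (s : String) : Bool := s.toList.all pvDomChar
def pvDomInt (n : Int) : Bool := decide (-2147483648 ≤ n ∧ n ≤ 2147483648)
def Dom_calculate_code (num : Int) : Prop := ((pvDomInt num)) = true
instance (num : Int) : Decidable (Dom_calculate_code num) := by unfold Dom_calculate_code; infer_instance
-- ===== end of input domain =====

-- B precomputes the divisors of num once and emits, per head, only the divisors exceeding twice
-- the head (tail = divisor - head) instead of A's quadratic pair scan (objective: faster).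

-- ===== PORT A =====
-- inner 'while tail_pair_num < num: … break … tail_pair_num += 1' loop of A, threading pairs_list as acc
def pvInnerA (num h tail : Int) (acc : List Int) : List Int :=
  if tail < num then
    if h + tail > num then acc
    else
      pvInnerA num h (tail + 1)
        (if PySem.Int.mod num (h + tail) == 0 then acc ++ [h, tail] else acc)
  else acc
termination_by (num - tail).toNat
decreasing_by omega

def calculate_code (num : Int) : String :=
  let pairs_list := (PySem.List.pyRange 1 num 1).foldl (fun acc h => pvInnerA num h (h + 1) acc) []
  PySem.Str.join "" (pairs_list.map PySem.Int.toStr)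

-- ===== PORT B =====
def calculate_code_alt (num : Int) : String :=
  let divs := (PySem.List.pyRange 3 (num + 1) 1).filter (fun d => PySem.Int.mod num d == 0)
  let parts := (PySem.List.pyRange 1 (PySem.Int.floordiv (num + 1) 2) 1).foldl
    (fun acc h =>
      divs.foldl
        (fun acc2 d =>
          if 2 * h < d then acc2 ++ [PySem.Int.toStr h, PySem.Int.toStr (d - h)] else acc2)
        acc)
    []
  PySem.Str.join "" parts

-- ===== PRECONDITION & SPEC =====
def Spec_calculate_code (num : Int) (out : String) : Prop := out = calculate_code_alt num
instance (num : Int) (out : String) : Decidable (Spec_calculate_code num out) := by unfold Spec_calculate_code; infer_instance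

-- ===== CLAIM (what is proved, stated in full; the proofs are below) =====
def Claim_equal_calculate_code : Prop := ∀ (num : Int), Dom_calculate_code num → Spec_calculate_code num (calculate_code num)

-- ===== LEMMAS AND PROOFS =====

-- the pairs contributed by one head h, indexed by the pair sum s
def pvSeg (num h : Int) : List Int :=
  ((PySem.List.pyRange (2 * h + 1) (num + 1) 1).filter
      (fun s => PySem.Int.mod num s == 0)).flatMap (fun s => [h, s - h])

theorem pvInnerA_eq_aux (num h : Int) (hh : 1 ≤ h) :
    ∀ (n : Nat) (t : Int) (acc : List Int), (num - t).toNat ≤ n →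
      pvInnerA num h t acc =
        acc ++ ((PySem.List.pyRange (h + t) (num + 1) 1).filter
            (fun s => PySem.Int.mod num s == 0)).flatMap (fun s => [h, s - h]) := by
  intro n
  induction n with
  | zero =>
    intro t acc hn
    rw [pvInnerA]
    simp only [show ¬ t < num by omega, if_false]
    rw [PySem.List.pyRange_one_eq_nil (by omega : (num : Int) + 1 ≤ h + t)]
    simp
  | succ n ih =>
    intro t acc hn
    rw [pvInnerA]
    by_cases h1 : t < num
    · by_cases h2 : h + t > num
      · rw [PySem.List.pyRange_one_eq_nil (by omega : (num : Int) + 1 ≤ h + t)]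
        simp [h1, h2]
      · have ih' := ih (t + 1) (if PySem.Int.mod num (h + t) == 0 then acc ++ [h, t] else acc) (by omega)
        simp only [h1, h2, if_true, if_false]
        rw [ih']
        rw [PySem.List.pyRange_one_cons (by omega : h + t < num + 1)]
        by_cases h3 : PySem.Int.mod num (h + t) == 0
        · simp [h3, show h + (t + 1) = h + t + 1 by ring, show h + t - h = t by ring]
        · simp only [List.filter_cons, h3]
          simp [show h + (t + 1) = h + t + 1 by ring]
    · rw [PySem.List.pyRange_one_eq_nil (by omega : (num : Int) + 1 ≤ h + t)]
      simp [h1]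

theorem pvInnerA_eq (num h : Int) (hh : 1 ≤ h) (acc : List Int) :
    pvInnerA num h (h + 1) acc = acc ++ pvSeg num h := by
  rw [pvInnerA_eq_aux num h hh (num - (h + 1)).toNat (h + 1) acc le_rfl, pvSeg,
    show h + (h + 1) = 2 * h + 1 by ring]

-- filtering a unit range by a lower bound shifts its start
theorem pvFilter_range_lt (c : Int) :
    ∀ (n : Nat) (a b : Int), (b - a).toNat ≤ n → a ≤ c + 1 →
      (PySem.List.pyRange a b 1).filter (fun d => decide (c < d)) = PySem.List.pyRange (c + 1) b 1 := by
  intro n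
  induction n with
  | zero =>
    intro a b hn hac
    rw [PySem.List.pyRange_one_eq_nil (by omega : b ≤ a),
      PySem.List.pyRange_one_eq_nil (by omega : b ≤ c + 1)]
    simp
  | succ n ih =>
    intro a b hn hac
    by_cases hab : a < b
    · rw [PySem.List.pyRange_one_cons hab]
      by_cases hc : a ≤ c
      · have := ih (a + 1) b (by omega) (by omega)
        simp only [List.filter_cons]
        simp [show ¬ c < a by omega, this]
      · have hae : a = c + 1 := by omega
        subst hae
        rw [← PySem.List.pyRange_one_cons hab]
        rw [List.filter_eq_self.mpr]
        intro x hx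
        have := (PySem.List.mem_pyRange_one).mp hx
        simp; omega
    · rw [PySem.List.pyRange_one_eq_nil (by omega : b ≤ a),
        PySem.List.pyRange_one_eq_nil (by omega : b ≤ c + 1)]
      simp

theorem pvFlatMap_ite {α β : Type} (p : α → Bool) (g : α → List β) :
    ∀ l : List α, (l.flatMap (fun d => if p d = true then g d else []))
      = (l.filter p).flatMap g := by
  intro l
  induction l with
  | nil => simp
  | cons x xs ih =>
    by_cases hp : p x <;> simp [hp, ih]

-- B's inner loop over the divisor list produces exactly the stringified segment for head h
theorem pvInnerB_eq (num h : Int) (hh : 1 ≤ h) (acc : List String) :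
    ((PySem.List.pyRange 3 (num + 1) 1).filter (fun d => PySem.Int.mod num d == 0)).foldl
      (fun acc2 d =>
        if 2 * h < d then acc2 ++ [PySem.Int.toStr h, PySem.Int.toStr (d - h)] else acc2)
      acc
    = acc ++ (pvSeg num h).map PySem.Int.toStr := by
  rw [PySem.List.foldl_congr_mem _ _
      (fun acc2 d => acc2 ++
        (if decide (2 * h < d) = true then [PySem.Int.toStr h, PySem.Int.toStr (d - h)] else []))
      _ (by intro acc2 d _; by_cases hd : 2 * h < d <;> simp [hd])]
  rw [PySem.List.foldl_append_eq_flatMap]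
  congr 1
  rw [pvFlatMap_ite]
  rw [List.filter_filter]
  have hcomm : ((PySem.List.pyRange 3 (num + 1) 1).filter
        (fun d => decide (2 * h < d) && (PySem.Int.mod num d == 0)))
      = ((PySem.List.pyRange 3 (num + 1) 1).filter (fun d => decide (2 * h < d))).filter
        (fun d => PySem.Int.mod num d == 0) := by
    rw [List.filter_filter]
    apply List.filter_congr
    intro x _
    cases hx : decide (2 * h < x) <;> simp
  rw [hcomm, pvFilter_range_lt (2 * h) (num + 1 - 3).toNat 3 (num + 1) le_rfl (by omega)]
  rw [pvSeg, List.map_flatMap]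
  simp

-- heads at or beyond ceil(num/2) contribute nothing
theorem pvSeg_nil (num h : Int) (hq : PySem.Int.floordiv (num + 1) 2 ≤ h) :
    pvSeg num h = [] := by
  rw [pvSeg, PySem.List.pyRange_one_eq_nil, List.filter_nil, List.flatMap_nil]
  have h2 : PySem.Int.floordiv (num + 1) 2 = (num + 1) / 2 :=
    PySem.Int.floordiv_eq_ediv_of_pos (by omega)
  omega

-- ===== VERDICT (by name: the statement is the Claim_ definition above) =====
theorem calculate_code_spec : Claim_equal_calculate_code := by
  intro num _
  unfold Spec_calculate_code calculate_code calculate_code_alt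
  dsimp only
  congr 1
  -- A side: flatten the double loop
  rw [PySem.List.foldl_congr_mem _ _ (fun (acc : List Int) h => acc ++ pvSeg num h) _
      (by
        intro acc h hmem
        have hh := (PySem.List.mem_pyRange_one).mp hmem
        exact pvInnerA_eq num h hh.1 acc)]
  rw [PySem.List.foldl_append_eq_flatMap]
  -- B side: flatten the double loop
  rw [PySem.List.foldl_congr_mem _ _
      (fun (acc : List String) h => acc ++ (pvSeg num h).map PySem.Int.toStr) _
      (by
        intro acc h hmem
        have hh := (PySem.List.mem_pyRange_one).mp hmem
        exact pvInnerB_eq num h hh.1 acc)]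
  rw [PySem.List.foldl_append_eq_flatMap]
  simp only [List.nil_append, List.map_flatMap]
  -- the tail of A's head range contributes nothing
  have hq2 : PySem.Int.floordiv (num + 1) 2 = (num + 1) / 2 :=
    PySem.Int.floordiv_eq_ediv_of_pos (by omega)
  by_cases hn : num ≤ 1
  · rw [PySem.List.pyRange_one_eq_nil (by omega : num ≤ 1),
      PySem.List.pyRange_one_eq_nil (by omega : PySem.Int.floordiv (num + 1) 2 ≤ 1)]
  · rw [PySem.List.pyRange_one_append 1 (PySem.Int.floordiv (num + 1) 2) num (by omega) (by omega),
      List.flatMap_append]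
    have htail : ((PySem.List.pyRange (PySem.Int.floordiv (num + 1) 2) num 1).flatMap
        fun h => (pvSeg num h).map PySem.Int.toStr) = [] := by
      rw [List.flatMap_eq_nil_iff]
      intro h hmem
      have hh := (PySem.List.mem_pyRange_one).mp hmem
      rw [pvSeg_nil num h (by omega)]
      simp
    rw [htail, List.append_nil]
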